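-- pv_equiv track=rewrite | github.com/babysitterd/quick-and-dirty-advent-of-code-2020 | 10/solution.py | hop_count
-- ===== SOURCE A (Python) =====
-- def hop_count(n, data):
--     if n < 0:
--         return 0
--
--     if n == 0:
--         return 1
--
--     if n not in data:
--         return 0
--
--     return hop_count(n - 1, data) + hop_count(n - 2, data) + hop_count(n - 3, data)
-- ===== SOURCE B (Python) =====
-- def hop_count(n, data):
--     # DP over the distinct reachable values in data instead of A's 3-way recursion.
--     if n < 0:
--         return 0
--     if n == 0:
--         return 1
--     if n not in data:
--         return 0
--     ways = {0: 1}
--     for v in sorted(set(x for x in data if 0 < x <= n)):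
--         ways[v] = ways.get(v - 1, 0) + ways.get(v - 2, 0) + ways.get(v - 3, 0)
--     return ways[n]
-- ===== Notes on version B (the rewrite author's own statement) =====
-- stated objective: alternative
-- what changed: Replaces the 3-way recursion with a bottom-up dynamic program over the sorted distinct values of data between 1 and n, each value computed once from a dict of earlier results.
import Mathlib
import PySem

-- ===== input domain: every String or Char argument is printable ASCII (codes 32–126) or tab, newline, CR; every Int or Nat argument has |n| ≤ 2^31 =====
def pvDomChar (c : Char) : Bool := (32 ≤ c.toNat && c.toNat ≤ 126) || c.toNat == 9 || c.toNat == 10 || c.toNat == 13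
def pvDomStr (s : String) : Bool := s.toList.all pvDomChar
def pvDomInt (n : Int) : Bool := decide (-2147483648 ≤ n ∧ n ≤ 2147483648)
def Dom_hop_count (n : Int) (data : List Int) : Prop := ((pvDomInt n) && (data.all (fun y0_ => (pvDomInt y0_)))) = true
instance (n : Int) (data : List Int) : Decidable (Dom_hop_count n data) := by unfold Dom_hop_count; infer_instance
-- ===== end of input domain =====

-- B replaces A's 3-way recursion with a bottom-up dynamic program over the sorted
-- distinct values of data in (0, n]; objective: alternative.

-- ===== PORT A =====
def hop_count (n : Int) (data : List Int) : Int :=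
  if n < 0 then 0
  else if n = 0 then 1
  else if ¬ data.contains n then 0
  else hop_count (n - 1) data + hop_count (n - 2) data + hop_count (n - 3) data
termination_by n.toNat
decreasing_by all_goals omega

-- ===== PORT B =====
def hop_count_alt (n : Int) (data : List Int) : Int :=
  if n < 0 then 0
  else if n = 0 then 1
  else if ¬ data.contains n then 0
  else
    let vals := PySem.List.sorted
      (PySem.Set.ofList (data.filter (fun x => decide (0 < x) && decide (x ≤ n)))) (fun x => x) false
    let ways := vals.foldl
      (fun d v => d.insert v (d.getD (v - 1) 0 + d.getD (v - 2) 0 + d.getD (v - 3) 0))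
      (PySem.Dict.insert PySem.Dict.empty 0 1)
    -- ways[n]: the key n is always present here (n ∈ vals), so no KeyError arises
    (ways.get? n).getD 0

-- ===== PRECONDITION & SPEC =====
def Spec_hop_count (n : Int) (data : List Int) (out : Int) : Prop := out = hop_count_alt n data
instance (n : Int) (data : List Int) (out : Int) : Decidable (Spec_hop_count n data out) := by unfold Spec_hop_count; infer_instance

-- ===== CLAIM (what is proved, stated in full; the proofs are below) =====
def Claim_equal_hop_count : Prop := ∀ (n : Int) (data : List Int), Dom_hop_count n data → Spec_hop_count n data (hop_count n data)

-- ===== LEMMAS AND PROOFS =====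

theorem hop_neg (n : Int) (data : List Int) (h : n < 0) : hop_count n data = 0 := by
  rw [hop_count]; simp [h]

theorem hop_zero (data : List Int) : hop_count 0 data = 1 := by
  rw [hop_count]; simp

theorem hop_not_mem (n : Int) (data : List Int) (h0 : n ≠ 0) (h : n ∉ data) :
    hop_count n data = 0 := by
  rw [hop_count]
  by_cases hn : n < 0 <;> simp_all

theorem hop_step (n : Int) (data : List Int) (h0 : 0 < n) (h : n ∈ data) :
    hop_count n data =
      hop_count (n - 1) data + hop_count (n - 2) data + hop_count (n - 3) data := by
  rw [hop_count]
  have h1 : ¬ n < 0 := by omega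
  have h2 : n ≠ 0 := by omega
  simp [h1, h2, h]

theorem fold_inv (n : Int) (data : List Int) :
    ∀ (rest : List Int) (d : PySem.Dict Int Int),
      (∀ v ∈ rest, v ∈ data ∧ 0 < v ∧ v ≤ n) →
      rest.Pairwise (· < ·) →
      (∀ u : Int, d.getD u 0 =
        if u = 0 then 1
        else if u ∈ data ∧ 0 < u ∧ u ≤ n ∧ u ∉ rest then hop_count u data else 0) →
      ∀ u : Int,
        (rest.foldl
          (fun d v => d.insert v (d.getD (v - 1) 0 + d.getD (v - 2) 0 + d.getD (v - 3) 0))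
          d).getD u 0 =
        if u = 0 then 1
        else if u ∈ data ∧ 0 < u ∧ u ≤ n then hop_count u data else 0 := by
  intro rest
  induction rest with
  | nil =>
    intro d _ _ hd u
    have := hd u
    simp only [List.not_mem_nil, not_false_iff, and_true] at this
    simpa using this
  | cons v rest ih =>
    intro d hmem hpw hd u
    obtain ⟨hv_data, hv_pos, hv_le⟩ := hmem v (List.mem_cons_self ..)
    have hgt : ∀ w ∈ rest, v < w := (List.pairwise_cons.mp hpw).1
    -- d.getD (v-k) 0 = hop_count (v-k) data for k = 1,2,3
    have hget : ∀ k : Int, 0 < k → d.getD (v - k) 0 = hop_count (v - k) data := by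
      intro k hk
      have := hd (v - k)
      by_cases hz : v - k = 0
      · rw [this]; simp [hz, hop_zero]
      · by_cases hin : (v - k) ∈ data ∧ 0 < v - k
        · have hnr : v - k ∉ v :: rest := by
            intro hc
            rcases List.mem_cons.mp hc with h | h
            · omega
            · have := hgt _ h; omega
          rw [this]; simp [hz, hin.1, hnr]; intro; omega
        · rw [this]
          have hzero : hop_count (v - k) data = 0 := by
            by_cases hneg : v - k < 0
            · exact hop_neg _ _ hneg
            · have : (v - k) ∉ data := by
                intro hc; exact hin ⟨hc, by omega⟩
              exact hop_not_mem _ _ hz this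
          simp [hz, hzero]
    have hval : d.getD (v - 1) 0 + d.getD (v - 2) 0 + d.getD (v - 3) 0 = hop_count v data := by
      rw [hget 1 (by omega), hget 2 (by omega), hget 3 (by omega),
        ← hop_step v data hv_pos hv_data]
    simp only [List.foldl_cons]
    apply ih
    · intro w hw; exact hmem w (List.mem_cons_of_mem _ hw)
    · exact (List.pairwise_cons.mp hpw).2
    · intro u
      rw [PySem.Dict.getD_insert]
      by_cases huv : u = v
      · subst huv
        have hnr : u ∉ rest := by intro hc; have := hgt _ hc; omega
        have hune : u ≠ 0 := by omega
        simp [hval, hv_data, hv_pos, hv_le, hnr, hune]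
      · rw [if_neg huv, hd u]
        by_cases hz : u = 0
        · simp [hz]
        · simp only [if_neg hz]
          by_cases hc : u ∈ data ∧ 0 < u ∧ u ≤ n ∧ u ∉ rest
          · have : u ∉ v :: rest := by
              intro h; rcases List.mem_cons.mp h with h | h
              · exact huv h
              · exact hc.2.2.2 h
            simp [hc.1, hc.2.1, hc.2.2.1, hc.2.2.2, this]
          · have : ¬ (u ∈ data ∧ 0 < u ∧ u ≤ n ∧ u ∉ v :: rest) := by
              intro h
              exact hc ⟨h.1, h.2.1, h.2.2.1, fun hr => h.2.2.2 (List.mem_cons_of_mem _ hr)⟩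
            simp only [if_neg hc, if_neg this]

-- ===== VERDICT (by name: the statement is the Claim_ definition above) =====
theorem hop_count_spec : Claim_equal_hop_count := by
  intro n data _
  unfold Spec_hop_count hop_count_alt
  by_cases h1 : n < 0
  · simp [h1, hop_neg n data h1]
  by_cases h2 : n = 0
  · subst h2; simp [hop_zero]
  by_cases h3 : n ∈ data
  swap
  · have hc : data.contains n = false := by simpa using h3
    rw [hop_not_mem n data h2 h3]
    simp [h1, h2, h3]
  · have hcont : data.contains n = true := by simpa using h3
    rw [if_neg h1, if_neg h2, if_neg (by simp [h3])]
    set fl := data.filter (fun x => decide (0 < x) && decide (x ≤ n)) with hfl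
    set vals := PySem.List.sorted (PySem.Set.ofList fl) (fun x => x) false with hvals
    have hmemvals : ∀ v : Int, v ∈ vals ↔ (v ∈ data ∧ 0 < v ∧ v ≤ n) := by
      intro v
      rw [hvals, PySem.List.mem_sorted, PySem.Set.mem_ofList, hfl, List.mem_filter]
      simp
    have hpw : vals.Pairwise (· < ·) := PySem.List.sorted_ofList_pairwise_lt fl
    have hinv := fold_inv n data vals
      (PySem.Dict.insert PySem.Dict.empty 0 1)
      (fun v hv => (hmemvals v).mp hv) hpw
      (by
        intro u
        rw [PySem.Dict.getD_insert]
        by_cases hz : u = 0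
        · simp [hz]
        · simp only [if_neg hz, PySem.Dict.getD_empty]
          have : ¬ (u ∈ data ∧ 0 < u ∧ u ≤ n ∧ u ∉ vals) := by
            intro h
            exact h.2.2.2 ((hmemvals u).mpr ⟨h.1, h.2.1, h.2.2.1⟩)
          simp [this]) n
    have hnpos : 0 < n := by omega
    rw [PySem.Dict.getD_eq_get?_getD] at hinv
    rw [if_neg h2, if_pos ⟨h3, hnpos, le_refl n⟩] at hinv
    exact hinv.symm
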